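-- pv_equiv track=rewrite | github.com/riliasov/task2-xlsx-import-to-mysql | task2.py | _validate_country_code
-- ===== SOURCE A (Python) =====
-- COUNTRY_CODES = {
--     'RU': {'codes': ['7'], 'length': 11},
--     'UA': {'codes': ['380'], 'length': 12},
--     'BY': {'codes': ['375'], 'length': 12},
--     'KZ': {'codes': ['7'], 'length': 11},
--     'UZ': {'codes': ['998'], 'length': 12},
--     'AM': {'codes': ['374'], 'length': 11},
--     'AZ': {'codes': ['994'], 'length': 12},
--     'GE': {'codes': ['995'], 'length': 12},
--     'MD': {'codes': ['373'], 'length': 11},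
--     'KG': {'codes': ['996'], 'length': 12},
--     'EE': {'codes': ['372'], 'length': 11},
--     'LV': {'codes': ['371'], 'length': 11},
--     'LT': {'codes': ['370'], 'length': 11},
--     'PL': {'codes': ['48'], 'length': 11},
--     'DE': {'codes': ['49'], 'length': 12},
--     'FR': {'codes': ['33'], 'length': 11},
--     'IT': {'codes': ['39'], 'length': 11},
--     'ES': {'codes': ['34'], 'length': 11},
--     'GB': {'codes': ['44'], 'length': 12},
--     'AE': {'codes': ['971'], 'length': 12},
-- }
--
-- def _validate_country_code(phone_clean: str) -> str:
--     """Validate phone number against country codes."""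
--     if not phone_clean or not phone_clean.startswith('+'):
--         return "Missing country code"
--
--     for country, info in COUNTRY_CODES.items():
--         for code in info['codes']:
--             if phone_clean.startswith('+' + code):
--                 expected_length = len(code) + 1 + (info['length'] - len(code))
--                 if len(phone_clean) == expected_length:
--                     return ""  # Valid
--                 else:
--                     return f"Invalid length for {country}"
--
--     return "Unknown country code"
-- ===== SOURCE B (Python) =====
-- COUNTRY_CODES = {
--     'RU': {'codes': ['7'], 'length': 11},
--     'UA': {'codes': ['380'], 'length': 12},
--     'BY': {'codes': ['375'], 'length': 12},
--     'KZ': {'codes': ['7'], 'length': 11},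
--     'UZ': {'codes': ['998'], 'length': 12},
--     'AM': {'codes': ['374'], 'length': 11},
--     'AZ': {'codes': ['994'], 'length': 12},
--     'GE': {'codes': ['995'], 'length': 12},
--     'MD': {'codes': ['373'], 'length': 11},
--     'KG': {'codes': ['996'], 'length': 12},
--     'EE': {'codes': ['372'], 'length': 11},
--     'LV': {'codes': ['371'], 'length': 11},
--     'LT': {'codes': ['370'], 'length': 11},
--     'PL': {'codes': ['48'], 'length': 11},
--     'DE': {'codes': ['49'], 'length': 12},
--     'FR': {'codes': ['33'], 'length': 11},
--     'IT': {'codes': ['39'], 'length': 11},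
--     'ES': {'codes': ['34'], 'length': 11},
--     'GB': {'codes': ['44'], 'length': 12},
--     'AE': {'codes': ['971'], 'length': 12},
-- }
--
-- # Inverted index: code string -> (country, length); built once, first-wins
-- # (setdefault) so the '7' collision keeps RU, matching the table's order.
-- _CODE_LOOKUP = {}
-- for _country, _info in COUNTRY_CODES.items():
--     for _code in _info['codes']:
--         _CODE_LOOKUP.setdefault(_code, (_country, _info['length']))
--
--
-- def _validate_country_code(phone_clean: str) -> str:
--     """Validate phone number against country codes."""
--     if not phone_clean or not phone_clean.startswith('+'):
--         return "Missing country code"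
--
--     for prefix_len in (1, 2, 3):
--         hit = _CODE_LOOKUP.get(phone_clean[1:1 + prefix_len])
--         if hit is not None:
--             country, length = hit
--             if len(phone_clean) == length + 1:
--                 return ""  # Valid
--             return f"Invalid length for {country}"
--
--     return "Unknown country code"
-- ===== Notes on version B (the rewrite author's own statement) =====
-- stated objective: idiomatic
-- what changed: A scans the whole 20-entry country table per call testing startswith for each code; B precomputes once an inverted code->(country,length) dict (setdefault keeps RU for the '7' collision) and loops only over the three candidate prefix lengths, doing one dict lookup each.
import Mathlib
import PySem

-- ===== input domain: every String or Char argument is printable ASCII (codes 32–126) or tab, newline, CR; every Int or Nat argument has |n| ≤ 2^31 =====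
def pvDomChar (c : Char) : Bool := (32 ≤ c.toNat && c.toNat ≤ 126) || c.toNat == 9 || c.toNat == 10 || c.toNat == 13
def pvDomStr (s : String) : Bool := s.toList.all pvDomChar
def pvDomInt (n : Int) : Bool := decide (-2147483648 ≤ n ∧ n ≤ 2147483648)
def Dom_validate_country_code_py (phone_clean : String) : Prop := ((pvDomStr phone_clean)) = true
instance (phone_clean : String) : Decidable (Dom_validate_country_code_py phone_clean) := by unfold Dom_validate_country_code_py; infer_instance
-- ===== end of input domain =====

-- B replaces A's scan over the country table by a precomputed code→(country,length)
-- inverted index consulted once per candidate prefix length (objective: idiomatic/alternative).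

-- ===== PORT A =====
-- COUNTRY_CODES, in insertion order: (country, codes, length)
def pvCountryCodes : List (String × List String × Int) :=
  [("RU", ["7"], 11), ("UA", ["380"], 12), ("BY", ["375"], 12), ("KZ", ["7"], 11),
   ("UZ", ["998"], 12), ("AM", ["374"], 11), ("AZ", ["994"], 12), ("GE", ["995"], 12),
   ("MD", ["373"], 11), ("KG", ["996"], 12), ("EE", ["372"], 11), ("LV", ["371"], 11),
   ("LT", ["370"], 11), ("PL", ["48"], 11), ("DE", ["49"], 12), ("FR", ["33"], 11),
   ("IT", ["39"], 11), ("ES", ["34"], 11), ("GB", ["44"], 12), ("AE", ["971"], 12)]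

-- inner 'for code in info["codes"]'
def pvInnerA (p : List Char) (country : String) (length : Int) : List String → Option String
  | [] => none
  | code :: rest =>
      if PySem.Chars.startswith p ('+' :: code.toList) then
        some (if (p.length : Int) = (code.toList.length : Int) + 1 + (length - (code.toList.length : Int))
              then "" else "Invalid length for " ++ country)
      else pvInnerA p country length rest

-- outer 'for country, info in COUNTRY_CODES.items()'
def pvOuterA (p : List Char) : List (String × List String × Int) → String
  | [] => "Unknown country code"
  | (country, codes, length) :: rest =>
      match pvInnerA p country length codes with
      | some r => r
      | none => pvOuterA p rest

def validate_country_code_py (phone_clean : String) : String :=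
  let p := phone_clean.toList
  if p = [] ∨ PySem.Chars.startswith p ['+'] = false then "Missing country code"
  else pvOuterA p pvCountryCodes

-- ===== PORT B =====
-- _CODE_LOOKUP = {} built with setdefault over COUNTRY_CODES (first-wins keeps RU for '7')
def pvCodeLookup : PySem.Dict (List Char) (String × Int) :=
  pvCountryCodes.foldl
    (fun d ci => ci.2.1.foldl (fun d code => d.setdefault code.toList (ci.1, ci.2.2)) d)
    PySem.Dict.empty

-- 'for prefix_len in (1, 2, 3)'
def pvLoopB (p : List Char) : List Int → String
  | [] => "Unknown country code"
  | L :: rest =>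
      match pvCodeLookup.get? (PySem.List.slice p (some 1) (some (1 + L))) with
      | some (country, length) =>
          if (p.length : Int) = length + 1 then "" else "Invalid length for " ++ country
      | none => pvLoopB p rest

def validate_country_code_py_alt (phone_clean : String) : String :=
  let p := phone_clean.toList
  if p = [] ∨ PySem.Chars.startswith p ['+'] = false then "Missing country code"
  else pvLoopB p [1, 2, 3]

-- ===== PRECONDITION & SPEC =====
def Spec_validate_country_code_py (phone_clean : String) (out : String) : Prop := out = validate_country_code_py_alt phone_clean
instance (phone_clean : String) (out : String) : Decidable (Spec_validate_country_code_py phone_clean out) := by unfold Spec_validate_country_code_py; infer_instance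

-- ===== CLAIM (what is proved, stated in full; the proofs are below) =====
def Claim_equal_validate_country_code_py : Prop := ∀ (phone_clean : String), Dom_validate_country_code_py phone_clean → Spec_validate_country_code_py phone_clean (validate_country_code_py phone_clean)

-- ===== LEMMAS AND PROOFS =====
-- proof-only helpers: the inverted index as a literal dict, and its lookups characterised
def pvItems : List (List Char × String × Int) :=
  [(['7'], ("RU", 11)), (['3','8','0'], ("UA", 12)), (['3','7','5'], ("BY", 12)), (['9','9','8'], ("UZ", 12)),
   (['3','7','4'], ("AM", 11)), (['9','9','4'], ("AZ", 12)), (['9','9','5'], ("GE", 12)),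
   (['3','7','3'], ("MD", 11)), (['9','9','6'], ("KG", 12)), (['3','7','2'], ("EE", 11)),
   (['3','7','1'], ("LV", 11)), (['3','7','0'], ("LT", 11)), (['4','8'], ("PL", 11)), (['4','9'], ("DE", 12)),
   (['3','3'], ("FR", 11)), (['3','9'], ("IT", 11)), (['3','4'], ("ES", 11)), (['4','4'], ("GB", 12)),
   (['9','7','1'], ("AE", 12))]

theorem pvLookup_eq : pvCodeLookup = PySem.Dict.mk pvItems := by decide

theorem lk1 (x : Char) : pvCodeLookup.get? [x] = if '7' = x then some ("RU", (11:Int)) else none := by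
  by_cases h : '7' = x
  · subst h; decide
  · simp [pvLookup_eq, pvItems, PySem.Dict.get?, h]

theorem lk2 (x y : Char) : pvCodeLookup.get? [x, y] =
    if '4' = x ∧ '8' = y then some ("PL", (11:Int)) else
    if '4' = x ∧ '9' = y then some ("DE", (12:Int)) else
    if '3' = x ∧ '3' = y then some ("FR", (11:Int)) else
    if '3' = x ∧ '9' = y then some ("IT", (11:Int)) else
    if '3' = x ∧ '4' = y then some ("ES", (11:Int)) else
    if '4' = x ∧ '4' = y then some ("GB", (12:Int)) else
    none := by
  by_cases h1 : '4' = x ∧ '8' = y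
  · obtain ⟨rfl, rfl⟩ := h1; decide
  rw [if_neg h1]
  by_cases h2 : '4' = x ∧ '9' = y
  · obtain ⟨rfl, rfl⟩ := h2; decide
  rw [if_neg h2]
  by_cases h3 : '3' = x ∧ '3' = y
  · obtain ⟨rfl, rfl⟩ := h3; decide
  rw [if_neg h3]
  by_cases h4 : '3' = x ∧ '9' = y
  · obtain ⟨rfl, rfl⟩ := h4; decide
  rw [if_neg h4]
  by_cases h5 : '3' = x ∧ '4' = y
  · obtain ⟨rfl, rfl⟩ := h5; decide
  rw [if_neg h5]
  by_cases h6 : '4' = x ∧ '4' = y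
  · obtain ⟨rfl, rfl⟩ := h6; decide
  rw [if_neg h6]
  push_neg at h1 h2 h3 h4 h5 h6
  simp only [pvLookup_eq, pvItems, PySem.Dict.get?]
  simp
  exact ⟨h1, h2, h3, h4, h5, h6⟩

set_option maxHeartbeats 4000000 in
theorem lk3 (x y z : Char) : pvCodeLookup.get? [x, y, z] =
    if '3' = x ∧ '8' = y ∧ '0' = z then some ("UA", (12:Int)) else
    if '3' = x ∧ '7' = y ∧ '5' = z then some ("BY", (12:Int)) else
    if '9' = x ∧ '9' = y ∧ '8' = z then some ("UZ", (12:Int)) else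
    if '3' = x ∧ '7' = y ∧ '4' = z then some ("AM", (11:Int)) else
    if '9' = x ∧ '9' = y ∧ '4' = z then some ("AZ", (12:Int)) else
    if '9' = x ∧ '9' = y ∧ '5' = z then some ("GE", (12:Int)) else
    if '3' = x ∧ '7' = y ∧ '3' = z then some ("MD", (11:Int)) else
    if '9' = x ∧ '9' = y ∧ '6' = z then some ("KG", (12:Int)) else
    if '3' = x ∧ '7' = y ∧ '2' = z then some ("EE", (11:Int)) else
    if '3' = x ∧ '7' = y ∧ '1' = z then some ("LV", (11:Int)) else
    if '3' = x ∧ '7' = y ∧ '0' = z then some ("LT", (11:Int)) else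
    if '9' = x ∧ '7' = y ∧ '1' = z then some ("AE", (12:Int)) else
    none := by
  by_cases h1 : '3' = x ∧ '8' = y ∧ '0' = z
  · obtain ⟨rfl, rfl, rfl⟩ := h1; decide
  rw [if_neg h1]
  by_cases h2 : '3' = x ∧ '7' = y ∧ '5' = z
  · obtain ⟨rfl, rfl, rfl⟩ := h2; decide
  rw [if_neg h2]
  by_cases h3 : '9' = x ∧ '9' = y ∧ '8' = z
  · obtain ⟨rfl, rfl, rfl⟩ := h3; decide
  rw [if_neg h3]
  by_cases h4 : '3' = x ∧ '7' = y ∧ '4' = z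
  · obtain ⟨rfl, rfl, rfl⟩ := h4; decide
  rw [if_neg h4]
  by_cases h5 : '9' = x ∧ '9' = y ∧ '4' = z
  · obtain ⟨rfl, rfl, rfl⟩ := h5; decide
  rw [if_neg h5]
  by_cases h6 : '9' = x ∧ '9' = y ∧ '5' = z
  · obtain ⟨rfl, rfl, rfl⟩ := h6; decide
  rw [if_neg h6]
  by_cases h7 : '3' = x ∧ '7' = y ∧ '3' = z
  · obtain ⟨rfl, rfl, rfl⟩ := h7; decide
  rw [if_neg h7]
  by_cases h8 : '9' = x ∧ '9' = y ∧ '6' = z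
  · obtain ⟨rfl, rfl, rfl⟩ := h8; decide
  rw [if_neg h8]
  by_cases h9 : '3' = x ∧ '7' = y ∧ '2' = z
  · obtain ⟨rfl, rfl, rfl⟩ := h9; decide
  rw [if_neg h9]
  by_cases h10 : '3' = x ∧ '7' = y ∧ '1' = z
  · obtain ⟨rfl, rfl, rfl⟩ := h10; decide
  rw [if_neg h10]
  by_cases h11 : '3' = x ∧ '7' = y ∧ '0' = z
  · obtain ⟨rfl, rfl, rfl⟩ := h11; decide
  rw [if_neg h11]
  by_cases h12 : '9' = x ∧ '7' = y ∧ '1' = z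
  · obtain ⟨rfl, rfl, rfl⟩ := h12; decide
  rw [if_neg h12]
  push_neg at h1 h2 h3 h4 h5 h6 h7 h8 h9 h10 h11 h12
  simp only [pvLookup_eq, pvItems, PySem.Dict.get?]
  simp
  exact ⟨h1, h2, h3, h4, h5, h6, h7, h8, h9, h10, h11, h12⟩

set_option maxHeartbeats 4000000 in
theorem pvMain (t : List Char) : pvOuterA ('+' :: t) pvCountryCodes = pvLoopB ('+' :: t) [1, 2, 3] := by
  match t with
  | [] => decide
  | [a] =>
    by_cases g1 : '7' = a
    · subst g1; decide
    · simp [pvOuterA, pvInnerA, pvLoopB, pvCountryCodes, PySem.Chars.startswith, List.isPrefixOf, PySem.List.slice, PySem.List.clampIdx, lk1, g1]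
  | [a, b] =>
    by_cases g1 : '7' = a
    · subst g1
      simp [pvOuterA, pvInnerA, pvLoopB, pvCountryCodes, PySem.Chars.startswith, List.isPrefixOf, PySem.List.slice, PySem.List.clampIdx, lk1]
    by_cases k1 : '4' = a ∧ '8' = b
    · obtain ⟨rfl, rfl⟩ := k1; decide
    by_cases k2 : '4' = a ∧ '9' = b
    · obtain ⟨rfl, rfl⟩ := k2; decide
    by_cases k3 : '3' = a ∧ '3' = b
    · obtain ⟨rfl, rfl⟩ := k3; decide
    by_cases k4 : '3' = a ∧ '9' = b
    · obtain ⟨rfl, rfl⟩ := k4; decide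
    by_cases k5 : '3' = a ∧ '4' = b
    · obtain ⟨rfl, rfl⟩ := k5; decide
    by_cases k6 : '4' = a ∧ '4' = b
    · obtain ⟨rfl, rfl⟩ := k6; decide
    simp [pvOuterA, pvInnerA, pvLoopB, pvCountryCodes, PySem.Chars.startswith, List.isPrefixOf, PySem.List.slice, PySem.List.clampIdx, lk1, lk2, g1, k1, k2, k3, k4, k5, k6]
  | a :: b :: c :: u =>
    by_cases g1 : '7' = a
    · subst g1
      simp [pvOuterA, pvInnerA, pvLoopB, pvCountryCodes, PySem.Chars.startswith, List.isPrefixOf, PySem.List.slice, PySem.List.clampIdx, lk1, lk2, lk3]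
      try split_ifs <;> first | rfl | omega
    by_cases g2 : '3' = a ∧ '8' = b ∧ '0' = c
    · obtain ⟨rfl, rfl, rfl⟩ := g2
      simp [pvOuterA, pvInnerA, pvLoopB, pvCountryCodes, PySem.Chars.startswith, List.isPrefixOf, PySem.List.slice, PySem.List.clampIdx, lk1, lk2, lk3]
      try split_ifs <;> first | rfl | omega
    by_cases g3 : '3' = a ∧ '7' = b ∧ '5' = c
    · obtain ⟨rfl, rfl, rfl⟩ := g3
      simp [pvOuterA, pvInnerA, pvLoopB, pvCountryCodes, PySem.Chars.startswith, List.isPrefixOf, PySem.List.slice, PySem.List.clampIdx, lk1, lk2, lk3]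
      try split_ifs <;> first | rfl | omega
    by_cases g4 : '9' = a ∧ '9' = b ∧ '8' = c
    · obtain ⟨rfl, rfl, rfl⟩ := g4
      simp [pvOuterA, pvInnerA, pvLoopB, pvCountryCodes, PySem.Chars.startswith, List.isPrefixOf, PySem.List.slice, PySem.List.clampIdx, lk1, lk2, lk3]
      try split_ifs <;> first | rfl | omega
    by_cases g5 : '3' = a ∧ '7' = b ∧ '4' = c
    · obtain ⟨rfl, rfl, rfl⟩ := g5
      simp [pvOuterA, pvInnerA, pvLoopB, pvCountryCodes, PySem.Chars.startswith, List.isPrefixOf, PySem.List.slice, PySem.List.clampIdx, lk1, lk2, lk3]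
      try split_ifs <;> first | rfl | omega
    by_cases g6 : '9' = a ∧ '9' = b ∧ '4' = c
    · obtain ⟨rfl, rfl, rfl⟩ := g6
      simp [pvOuterA, pvInnerA, pvLoopB, pvCountryCodes, PySem.Chars.startswith, List.isPrefixOf, PySem.List.slice, PySem.List.clampIdx, lk1, lk2, lk3]
      try split_ifs <;> first | rfl | omega
    by_cases g7 : '9' = a ∧ '9' = b ∧ '5' = c
    · obtain ⟨rfl, rfl, rfl⟩ := g7
      simp [pvOuterA, pvInnerA, pvLoopB, pvCountryCodes, PySem.Chars.startswith, List.isPrefixOf, PySem.List.slice, PySem.List.clampIdx, lk1, lk2, lk3]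
      try split_ifs <;> first | rfl | omega
    by_cases g8 : '3' = a ∧ '7' = b ∧ '3' = c
    · obtain ⟨rfl, rfl, rfl⟩ := g8
      simp [pvOuterA, pvInnerA, pvLoopB, pvCountryCodes, PySem.Chars.startswith, List.isPrefixOf, PySem.List.slice, PySem.List.clampIdx, lk1, lk2, lk3]
      try split_ifs <;> first | rfl | omega
    by_cases g9 : '9' = a ∧ '9' = b ∧ '6' = c
    · obtain ⟨rfl, rfl, rfl⟩ := g9
      simp [pvOuterA, pvInnerA, pvLoopB, pvCountryCodes, PySem.Chars.startswith, List.isPrefixOf, PySem.List.slice, PySem.List.clampIdx, lk1, lk2, lk3]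
      try split_ifs <;> first | rfl | omega
    by_cases g10 : '3' = a ∧ '7' = b ∧ '2' = c
    · obtain ⟨rfl, rfl, rfl⟩ := g10
      simp [pvOuterA, pvInnerA, pvLoopB, pvCountryCodes, PySem.Chars.startswith, List.isPrefixOf, PySem.List.slice, PySem.List.clampIdx, lk1, lk2, lk3]
      try split_ifs <;> first | rfl | omega
    by_cases g11 : '3' = a ∧ '7' = b ∧ '1' = c
    · obtain ⟨rfl, rfl, rfl⟩ := g11
      simp [pvOuterA, pvInnerA, pvLoopB, pvCountryCodes, PySem.Chars.startswith, List.isPrefixOf, PySem.List.slice, PySem.List.clampIdx, lk1, lk2, lk3]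
      try split_ifs <;> first | rfl | omega
    by_cases g12 : '3' = a ∧ '7' = b ∧ '0' = c
    · obtain ⟨rfl, rfl, rfl⟩ := g12
      simp [pvOuterA, pvInnerA, pvLoopB, pvCountryCodes, PySem.Chars.startswith, List.isPrefixOf, PySem.List.slice, PySem.List.clampIdx, lk1, lk2, lk3]
      try split_ifs <;> first | rfl | omega
    by_cases g13 : '4' = a ∧ '8' = b
    · obtain ⟨rfl, rfl⟩ := g13
      simp [pvOuterA, pvInnerA, pvLoopB, pvCountryCodes, PySem.Chars.startswith, List.isPrefixOf, PySem.List.slice, PySem.List.clampIdx, lk1, lk2, lk3]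
      try split_ifs <;> first | rfl | omega
    by_cases g14 : '4' = a ∧ '9' = b
    · obtain ⟨rfl, rfl⟩ := g14
      simp [pvOuterA, pvInnerA, pvLoopB, pvCountryCodes, PySem.Chars.startswith, List.isPrefixOf, PySem.List.slice, PySem.List.clampIdx, lk1, lk2, lk3]
      try split_ifs <;> first | rfl | omega
    by_cases g15 : '3' = a ∧ '3' = b
    · obtain ⟨rfl, rfl⟩ := g15
      simp [pvOuterA, pvInnerA, pvLoopB, pvCountryCodes, PySem.Chars.startswith, List.isPrefixOf, PySem.List.slice, PySem.List.clampIdx, lk1, lk2, lk3]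
      try split_ifs <;> first | rfl | omega
    by_cases g16 : '3' = a ∧ '9' = b
    · obtain ⟨rfl, rfl⟩ := g16
      simp [pvOuterA, pvInnerA, pvLoopB, pvCountryCodes, PySem.Chars.startswith, List.isPrefixOf, PySem.List.slice, PySem.List.clampIdx, lk1, lk2, lk3]
      try split_ifs <;> first | rfl | omega
    by_cases g17 : '3' = a ∧ '4' = b
    · obtain ⟨rfl, rfl⟩ := g17
      simp [pvOuterA, pvInnerA, pvLoopB, pvCountryCodes, PySem.Chars.startswith, List.isPrefixOf, PySem.List.slice, PySem.List.clampIdx, lk1, lk2, lk3]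
      try split_ifs <;> first | rfl | omega
    by_cases g18 : '4' = a ∧ '4' = b
    · obtain ⟨rfl, rfl⟩ := g18
      simp [pvOuterA, pvInnerA, pvLoopB, pvCountryCodes, PySem.Chars.startswith, List.isPrefixOf, PySem.List.slice, PySem.List.clampIdx, lk1, lk2, lk3]
      try split_ifs <;> first | rfl | omega
    by_cases g19 : '9' = a ∧ '7' = b ∧ '1' = c
    · obtain ⟨rfl, rfl, rfl⟩ := g19
      simp [pvOuterA, pvInnerA, pvLoopB, pvCountryCodes, PySem.Chars.startswith, List.isPrefixOf, PySem.List.slice, PySem.List.clampIdx, lk1, lk2, lk3]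
      try split_ifs <;> first | rfl | omega
    simp [pvOuterA, pvInnerA, pvLoopB, pvCountryCodes, PySem.Chars.startswith, List.isPrefixOf, PySem.List.slice, PySem.List.clampIdx, lk1, lk2, lk3, g1, g2, g3, g4, g5, g6, g7, g8, g9, g10, g11, g12, g13, g14, g15, g16, g17, g18, g19]

-- ===== VERDICT (by name: the statement is the Claim_ definition above) =====
theorem validate_country_code_py_spec : Claim_equal_validate_country_code_py := by
  intro s _
  unfold Spec_validate_country_code_py validate_country_code_py validate_country_code_py_alt
  cases h : s.toList with
  | nil => simp
  | cons c t =>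
    simp only []
    by_cases hc : c = '+'
    · subst hc
      simp [PySem.Chars.startswith, List.isPrefixOf, pvMain]
    · have hc' : ¬ '+' = c := fun hh => hc hh.symm
      simp [PySem.Chars.startswith, List.isPrefixOf, hc']
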